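-- pv_equiv track=rewrite | github.com/ASSERT-KTH/Mokav | experiments/pynguin/c4b/return-lst/generated_tests/src_466/3/src_466.py | func
-- ===== SOURCE A (Python) =====
-- def func(*args):
-- 	ret_values = []
--
-- 	size = int(args[0])
-- 	string = args[1]
-- 	list_ = list(string)
-- 	answer = []
-- 	counter = 0
-- 	for i in range(0, size):
-- 	    if (list_[i] == '1'):
-- 	        counter += 1
-- 	    else:
-- 	        answer.append(counter)
-- 	        counter = 0
-- 	answer.append(counter)
-- 	mystring = ''
-- 	for digit in answer:
-- 	    mystring += str(digit)
-- 	ret_values.append(mystring)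
--
-- 	return ret_values
-- ===== SOURCE B (Python) =====
-- def func(*args):
--     size = int(args[0])
--     string = args[1]
--     marked = ''.join('1' if c == '1' else '.' for c in string[:max(size, 0)])
--     return [''.join(str(len(group)) for group in marked.split('.'))]
-- ===== Notes on version B (the rewrite author's own statement) =====
-- stated objective: alternative
-- what changed: A counts '1'-runs with an inline counter/append loop and then concatenates digits in a second loop; B maps the first size chars to '1'/sentinel '.', splits that string on the sentinel, and joins the group lengths - a transform/split/measure pipeline with no explicit counter state.
-- crash fix: On size > len(string) A raises IndexError (list_[i] out of range) while B, which slices, returns the run-length string of the whole string. — e.g. on func(3, "1"): A raises IndexError, B returns ["1"]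
import Mathlib
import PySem

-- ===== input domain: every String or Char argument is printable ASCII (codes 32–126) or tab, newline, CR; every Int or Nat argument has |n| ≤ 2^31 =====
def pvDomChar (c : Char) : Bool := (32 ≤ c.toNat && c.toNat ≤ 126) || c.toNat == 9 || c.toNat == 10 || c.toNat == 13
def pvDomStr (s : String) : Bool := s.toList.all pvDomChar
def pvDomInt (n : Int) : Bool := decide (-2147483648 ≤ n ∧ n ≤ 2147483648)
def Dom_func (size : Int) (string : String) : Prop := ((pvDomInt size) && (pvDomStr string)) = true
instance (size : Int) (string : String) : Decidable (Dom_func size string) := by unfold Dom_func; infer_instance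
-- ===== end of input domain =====

-- B replaces A's inline counter loop by a transform → split-on-sentinel → measure pipeline (objective: alternative decomposition, same cost).


-- ===== PORT A =====
-- loop body of A's single for-loop over range(0, size)
def stepA (st : List Int × Int) (c : Char) : List Int × Int :=
  if c == '1' then (st.1, st.2 + 1) else (st.1 ++ [st.2], 0)

def func (size : Int) (string : String) : List String :=
  let list_ := string.toList
  -- 'list_[i]' inside Pre_func is always in range; pyGetD's default is never the result there
  let st := (PySem.List.pyRange 0 size 1).foldl
      (fun st i => stepA st (PySem.List.pyGetD list_ i ' ')) ([], 0)
  let answer := st.1 ++ [st.2]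
  let mystring := answer.foldl (fun s d => s ++ PySem.Int.toChars d) ([] : List Char)
  [String.ofList mystring]

-- ===== PORT B =====
-- '1' stays '1', every other char becomes the sentinel '.'
def markB (c : Char) : Char := if c == '1' then '1' else '.'

def func_alt (size : Int) (string : String) : List String :=
  let marked := (PySem.List.slice string.toList none (some (max size 0))).map markB
  let groups := PySem.Chars.splitOn marked ['.']
  [String.ofList (PySem.Chars.join [] (groups.map (fun g => PySem.Int.toChars (g.length : Int))))]

-- ===== PRECONDITION & SPEC =====
-- Pre_func excludes exactly the inputs where A raises IndexError: size larger than the string length.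
def Pre_func (size : Int) (string : String) : Prop := size ≤ (string.toList.length : Int)
instance (size : Int) (string : String) : Decidable (Pre_func size string) := by unfold Pre_func; infer_instance
def pvWitness_func : Int × String := (3, "110")

-- On inputs with size > len(string), A raises IndexError while B returns the run-lengths of the whole string.
def Raises_func (size : Int) (string : String) : Prop := (string.toList.length : Int) < size
instance (size : Int) (string : String) : Decidable (Raises_func size string) := by unfold Raises_func; infer_instance
def pvRaiseWitness_func : Int × String := (3, "1")
def pvRaiseWitnessOut_func : List String := ["1"]

def Spec_func (size : Int) (string : String) (out : List String) : Prop := out = func_alt size string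
instance (size : Int) (string : String) (out : List String) : Decidable (Spec_func size string out) := by unfold Spec_func; infer_instance

-- ===== CLAIM (what is proved, stated in full; the proofs are below) =====
def Claim_equal_func : Prop := ∀ (size : Int) (string : String), Dom_func size string → Pre_func size string → Spec_func size string (func size string)
def Claim_raises_func : Prop := (∀ (size : Int) (string : String), Dom_func size string → Raises_func size string → ¬ Pre_func size string) ∧ (Dom_func (pvRaiseWitness_func.1) (pvRaiseWitness_func.2) ∧ Raises_func (pvRaiseWitness_func.1) (pvRaiseWitness_func.2) ∧ func_alt (pvRaiseWitness_func.1) (pvRaiseWitness_func.2) = pvRaiseWitnessOut_func)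

-- ===== LEMMAS AND PROOFS =====

-- reference split-on-'.' (Python ''.split behaviour: empty input gives one empty group)
def split1 : List Char → List (List Char)
  | [] => [[]]
  | c :: t => if c = '.' then [] :: split1 t else (split1 t).modifyHead (c :: ·)

theorem split1_ne_nil : ∀ (l : List Char), split1 l ≠ []
  | [] => by simp [split1]
  | c :: t => by
    simp only [split1]
    split_ifs
    · simp
    · obtain ⟨g, gs, hg⟩ := List.exists_cons_of_ne_nil (split1_ne_nil t)
      simp [hg]

theorem splitOn_go_spec : ∀ (fuel : Nat) (l cur : List Char) (acc : List (List Char)),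
    l.length < fuel →
    PySem.Chars.splitOn.go ['.'] fuel l cur acc
      = acc.reverse ++ (split1 l).modifyHead (cur.reverse ++ ·) := by
  intro fuel
  induction fuel with
  | zero => intro l cur acc h; omega
  | succ n ih =>
    intro l cur acc h
    cases l with
    | nil => simp [PySem.Chars.splitOn.go, split1]
    | cons c rest =>
      by_cases hc : c = '.'
      · subst hc
        have : (['.'] : List Char).isPrefixOf ('.' :: rest) = true := by simp [List.isPrefixOf]
        simp only [PySem.Chars.splitOn.go, this, if_true, List.length_cons,
          List.length_nil, Nat.zero_add, List.drop_succ_cons, List.drop_zero]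
        rw [ih rest [] ((cur.reverse) :: acc) (by simpa using Nat.lt_of_succ_lt_succ h)]
        obtain ⟨g, gs, hg⟩ := List.exists_cons_of_ne_nil (split1_ne_nil rest)
        simp [split1, hg]
      · have hpre : (['.'] : List Char).isPrefixOf (c :: rest) = false := by
          simp [List.isPrefixOf]; exact fun hh => (hc hh.symm).elim
        simp only [PySem.Chars.splitOn.go, hpre]
        rw [if_neg (by simp)]
        rw [ih rest (c :: cur) acc (by simpa using Nat.lt_of_succ_lt_succ h)]
        obtain ⟨g, gs, hg⟩ := List.exists_cons_of_ne_nil (split1_ne_nil rest)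
        simp [split1, hc, hg]

theorem splitOn_dot (l : List Char) : PySem.Chars.splitOn l ['.'] = split1 l := by
  unfold PySem.Chars.splitOn
  rw [splitOn_go_spec (l.length + 1) l [] [] (by omega)]
  obtain ⟨g, gs, hg⟩ := List.exists_cons_of_ne_nil (split1_ne_nil l)
  simp [hg]

-- run lengths of the prefix, as produced by split1 on the marked chars
def lens (p : List Char) : List Int :=
  (split1 (p.map markB)).map (fun g => (g.length : Int))

theorem lens_ne_nil (p : List Char) : lens p ≠ [] := by
  unfold lens
  obtain ⟨g, gs, hg⟩ := List.exists_cons_of_ne_nil (split1_ne_nil (p.map markB))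
  simp [hg]

theorem lens_cons_one (t : List Char) :
    lens ('1' :: t) = (lens t).modifyHead (· + 1) := by
  unfold lens
  obtain ⟨g, gs, hg⟩ := List.exists_cons_of_ne_nil (split1_ne_nil (t.map markB))
  simp [markB, split1, hg]

theorem lens_cons_other {h : Char} (hne : h ≠ '1') (t : List Char) :
    lens (h :: t) = 0 :: lens t := by
  unfold lens
  simp [markB, hne, split1]

theorem foldA_spec : ∀ (l : List Char) (acc : List Int) (c : Int),
    (l.foldl stepA (acc, c)).1 ++ [(l.foldl stepA (acc, c)).2]
      = acc ++ (lens l).modifyHead (· + c) := by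
  intro l
  induction l with
  | nil => intro acc c; simp [lens, split1]
  | cons h t ih =>
    intro acc c
    by_cases h1 : h = '1'
    · subst h1
      have hstep : stepA (acc, c) '1' = (acc, c + 1) := by simp [stepA]
      simp only [List.foldl_cons, hstep]
      rw [ih acc (c + 1), lens_cons_one]
      obtain ⟨g, gs, hg⟩ := List.exists_cons_of_ne_nil (lens_ne_nil t)
      simp [hg]
      omega
    · have hstep : stepA (acc, c) h = (acc ++ [c], 0) := by simp [stepA, h1]
      simp only [List.foldl_cons, hstep]
      rw [ih (acc ++ [c]) 0, lens_cons_other h1]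
      obtain ⟨g, gs, hg⟩ := List.exists_cons_of_ne_nil (lens_ne_nil t)
      simp [hg]

theorem join_nil_flatten (l : List (List Char)) : PySem.Chars.join [] l = l.flatten := by
  unfold PySem.Chars.join
  induction l with
  | nil => simp [List.intercalate]
  | cons a t ih => cases t <;> simp_all [List.intercalate]

theorem foldStr_spec : ∀ (ds : List Int) (s : List Char),
    ds.foldl (fun s d => s ++ PySem.Int.toChars d) s = s ++ (ds.map PySem.Int.toChars).flatten := by
  intro ds
  induction ds with
  | nil => intro s; simp
  | cons d t ih => intro s; simp [ih]

theorem foldl_range_take (xs : List Char) (k : Nat) (hk : k ≤ xs.length)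
    (init : List Int × Int) :
    (PySem.List.pyRange 0 (k : Int) 1).foldl
        (fun st i => stepA st (PySem.List.pyGetD xs i ' ')) init
      = (xs.take k).foldl stepA init := by
  induction k generalizing init with
  | zero => simp [PySem.List.pyRange]
  | succ n ih =>
    have hcast : ((n + 1 : Nat) : Int) = (n : Int) + 1 := by push_cast; ring
    rw [hcast]
    rw [PySem.List.pyRange_one_append 0 (n : Int) ((n : Int) + 1) (by omega) (by omega)]
    have hone : PySem.List.pyRange (n : Int) ((n : Int) + 1) 1 = [(n : Int)] := by
      rw [PySem.List.pyRange_one_cons (by omega)]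
      simp [PySem.List.pyRange]
    rw [hone, List.foldl_append, ih (by omega) init]
    have hget : PySem.List.pyGetD xs (n : Int) ' ' = xs.getD n ' ' := PySem.List.pyGetD_natCast xs n ' '
    have hlt : n < xs.length := by omega
    have htake : xs.take (n + 1) = xs.take n ++ [xs.getD n ' '] := by
      rw [List.take_add_one, List.getElem?_eq_getElem hlt]
      simp [List.getD_eq_getElem?_getD, List.getElem?_eq_getElem hlt]
    rw [htake, List.foldl_append]
    simp [hget]

theorem func_spec : Claim_equal_func := by
  intro size string _ hpre
  unfold Spec_func func func_alt
  simp only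
  rw [splitOn_dot]
  have hmax : (0 : Int) ≤ max size 0 := le_max_right _ _
  rw [PySem.List.slice_to string.toList hmax]
  set xs := string.toList with hxs
  set k := (max size 0).toNat with hk
  have hkle : k ≤ xs.length := by
    have : size ≤ (xs.length : Int) := hpre
    omega
  have hrange : PySem.List.pyRange 0 size 1 = PySem.List.pyRange 0 (k : Int) 1 := by
    by_cases hs : 0 ≤ size
    · congr 1; omega
    · have h1 : PySem.List.pyRange 0 size 1 = [] := by
        simp [PySem.List.pyRange]; omega
      have h2 : (k : Int) = 0 := by omega
      rw [h1, h2]; simp [PySem.List.pyRange]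
    
  rw [hrange, foldl_range_take xs k hkle ([], 0)]
  congr 1
  apply congrArg
  rw [foldStr_spec, join_nil_flatten]
  have hlens : (List.foldl stepA ([], 0) (xs.take k)).1 ++ [(List.foldl stepA ([], 0) (xs.take k)).2] = (lens (xs.take k)).modifyHead (· + 0) := by
    simpa using foldA_spec (xs.take k) [] 0
  have hmod : (lens (xs.take k)).modifyHead (· + 0) = lens (xs.take k) := by
    obtain ⟨g, gs, hg⟩ := List.exists_cons_of_ne_nil (lens_ne_nil (xs.take k))
    simp [hg]
  rw [hlens, hmod]
  unfold lens
  simp [List.map_map, Function.comp_def]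

@[simp]
theorem func_raises : Claim_raises_func := by
  unfold Claim_raises_func
  exact ⟨by intro size string _ hr hp; unfold Raises_func at hr; unfold Pre_func at hp; omega, by decide⟩
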